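-- pv_equiv track=rewrite | github.com/joonda/Coding-Test | Python/lv1/76501. 음양 더하기/음양 더하기.py | solution
-- ===== SOURCE A (Python) =====
-- def solution(absolutes, signs):
--     idx = 0
--
--     for i in range (len(absolutes)):
--         if signs[i] == True:
--             idx += absolutes[i]
--         else:
--             idx -= absolutes[i]
--
--     return idx
-- ===== SOURCE B (Python) =====
-- def solution(absolutes, signs):
--     total = sum(absolutes)
--     neg = sum(a for a, s in zip(absolutes, signs) if s != True)
--     return total - 2 * neg
-- ===== Notes on version B (the rewrite author's own statement) =====
-- stated objective: alternative
-- what changed: Replaces the index loop with a branching accumulator by two unconditional aggregate passes: the grand total of all values minus twice the sum of the negatively-signed ones (signed sum = total - 2*negative part).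
import Mathlib
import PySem

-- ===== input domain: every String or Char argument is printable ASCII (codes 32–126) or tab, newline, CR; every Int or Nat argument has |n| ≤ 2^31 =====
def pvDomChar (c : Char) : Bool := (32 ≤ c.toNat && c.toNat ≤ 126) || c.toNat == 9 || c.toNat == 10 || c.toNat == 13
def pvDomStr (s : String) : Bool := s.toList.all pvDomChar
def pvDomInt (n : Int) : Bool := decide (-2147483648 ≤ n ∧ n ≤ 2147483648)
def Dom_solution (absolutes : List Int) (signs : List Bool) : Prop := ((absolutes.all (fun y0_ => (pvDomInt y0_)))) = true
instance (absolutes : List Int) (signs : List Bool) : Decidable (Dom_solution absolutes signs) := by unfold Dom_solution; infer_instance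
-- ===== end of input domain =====

-- B computes the signed sum as (total of all values) - 2*(sum of negatively-signed values), two aggregate passes instead of A's index loop with a branching accumulator.


-- ===== PORT A =====
def solution (absolutes : List Int) (signs : List Bool) : Int :=
  (PySem.List.pyRange 0 absolutes.length 1).foldl
    (fun idx i =>
      if PySem.List.pyGetD signs i false == true
      then idx + PySem.List.pyGetD absolutes i 0
      else idx - PySem.List.pyGetD absolutes i 0) 0

-- ===== PORT B =====
def solution_alt (absolutes : List Int) (signs : List Bool) : Int :=
  let total := absolutes.sum
  let neg := (((absolutes.zip signs).filter (fun p => p.2 != true)).map Prod.fst).sum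
  total - 2 * neg

-- ===== PRECONDITION & SPEC =====
-- Pre_ excludes exactly the inputs where A raises IndexError (signs shorter than absolutes).
def Pre_solution (absolutes : List Int) (signs : List Bool) : Prop :=
  absolutes.length ≤ signs.length
instance (absolutes : List Int) (signs : List Bool) : Decidable (Pre_solution absolutes signs) := by unfold Pre_solution; infer_instance
def pvWitness_solution : List Int × List Bool := ([3, -2], [true, false])

def Spec_solution (absolutes : List Int) (signs : List Bool) (out : Int) : Prop := out = solution_alt absolutes signs
instance (absolutes : List Int) (signs : List Bool) (out : Int) : Decidable (Spec_solution absolutes signs out) := by unfold Spec_solution; infer_instance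

-- ===== CLAIM (what is proved, stated in full; the proofs are below) =====
def Claim_equal_solution : Prop := ∀ (absolutes : List Int) (signs : List Bool), Dom_solution absolutes signs → Pre_solution absolutes signs → Spec_solution absolutes signs (solution absolutes signs)

-- ===== LEMMAS AND PROOFS =====

-- common reference value: signed sum over the zipped prefix
def sgn : List Int → List Bool → Int
  | [], _ => 0
  | _ :: _, [] => 0
  | a :: as, s :: ss => (if s then a else -a) + sgn as ss

lemma sgn_drop (as : List Int) (ss : List Bool) (k : Nat)
    (hk : k < as.length) (hk' : k < ss.length) :
    sgn (as.drop k) (ss.drop k)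
      = (if ss[k] then as[k] else -as[k]) + sgn (as.drop (k+1)) (ss.drop (k+1)) := by
  rw [List.drop_eq_getElem_cons hk, List.drop_eq_getElem_cons hk']
  rfl

lemma A_loop (as : List Int) (ss : List Bool) (h : as.length ≤ ss.length) :
    ∀ (k : Nat) (acc : Int), k ≤ as.length →
    (PySem.List.pyRange k as.length 1).foldl
      (fun idx i =>
        if PySem.List.pyGetD ss i false == true
        then idx + PySem.List.pyGetD as i 0
        else idx - PySem.List.pyGetD as i 0) acc
      = acc + sgn (as.drop k) (ss.drop k) := by
  intro k
  induction hn : as.length - k generalizing k with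
  | zero =>
    intro acc hk
    have hk' : k = as.length := by omega
    subst hk'
    rw [PySem.List.pyRange_one_eq_nil (by omega)]
    simp [List.drop_of_length_le, h, sgn]
  | succ n ih =>
    intro acc hk
    have hklt : k < as.length := by omega
    have hks : k < ss.length := by omega
    rw [PySem.List.pyRange_one_cons (by exact_mod_cast hklt)]
    simp only [List.foldl_cons]
    have h1 : PySem.List.pyGetD ss (k : Int) false = ss[k] := by
      rw [PySem.List.pyGetD_natCast]; simp [List.getD, hks]
    have h2 : PySem.List.pyGetD as (k : Int) 0 = as[k] := by
      rw [PySem.List.pyGetD_natCast]; simp [List.getD, hklt]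
    have hcast : (k : Int) + 1 = ((k + 1 : Nat) : Int) := by push_cast; ring
    rw [h1, h2, hcast, ih (k + 1) (by omega) _ (by omega),
        sgn_drop as ss k hklt hks]
    by_cases hs : ss[k] <;> simp [hs] <;> ring

lemma B_eq (as : List Int) (ss : List Bool) (h : as.length ≤ ss.length) :
    solution_alt as ss = sgn as ss := by
  induction as generalizing ss with
  | nil => simp [solution_alt, sgn]
  | cons a as ih =>
    cases ss with
    | nil => simp at h
    | cons s ss =>
      have ih' := ih ss (by simpa using Nat.le_of_succ_le_succ h)
      simp only [solution_alt] at ih' ⊢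
      simp only [List.zip_cons_cons, List.filter_cons, List.sum_cons]
      cases s <;> simp [sgn] at ih' ⊢ <;> linarith [ih']

-- ===== VERDICT (by name: the statement is the Claim_ definition above) =====
theorem solution_spec : Claim_equal_solution := by
  intro as ss _ hpre
  show solution as ss = solution_alt as ss
  rw [B_eq as ss hpre]
  have := A_loop as ss hpre 0 0 (by omega)
  simpa [solution] using this
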